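-- pv_equiv track=rewrite | github.com/Kimuksung/codewars-programmers | 프로그래머스-두 큐 합 같게 만들기2.py | solution
-- ===== SOURCE A (Python) =====
-- from collections import deque
--
-- def solution(queue1, queue2):
--     answer = 0
--     queue1=deque(queue1)
--     queue2=deque(queue2)
--     q1 = sum(queue1)
--     q2 = sum(queue2)
--     while queue2 and queue1 :
--         if answer > 600000:
--             return -1
--         if q1==q2:
--             return answer
--
--         elif q1 < q2 :
--             q1+=queue2[0]
--             q2-=queue2[0]
--             queue1.append(queue2.popleft())
--         else:
--             q2+=queue1[0]
--             q1-=queue1[0]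
--             queue2.append(queue1.popleft())
--         answer+=1
--
--     if not queue1 or not queue2:
--         answer=-1
--     return answer
-- ===== SOURCE B (Python) =====
-- def solution(queue1, queue2):
--     # Index-window reformulation: no deques, no list mutation; a window
--     # [l, r) over the fixed circular array combined represents queue1.
--     combined = list(queue1) + list(queue2)
--     L = len(combined)
--     S = sum(combined)
--     s1 = sum(queue1)
--     l, r = 0, len(queue1)
--     answer = 0
--     while r - l != 0 and r - l != L:
--         if answer > 600000:
--             return -1
--         if 2 * s1 == S:
--             return answer
--         if 2 * s1 < S:
--             s1 += combined[r % L]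
--             r += 1
--         else:
--             s1 -= combined[l % L]
--             l += 1
--         answer += 1
--     return -1
-- ===== Notes on version B (the rewrite author's own statement) =====
-- stated objective: alternative
-- what changed: Replaces A's two mutated deques by two monotone indices l,r forming a window over the fixed circular array queue1+queue2 with a running window sum, so no queue element is ever moved or copied per step.
import Mathlib
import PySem

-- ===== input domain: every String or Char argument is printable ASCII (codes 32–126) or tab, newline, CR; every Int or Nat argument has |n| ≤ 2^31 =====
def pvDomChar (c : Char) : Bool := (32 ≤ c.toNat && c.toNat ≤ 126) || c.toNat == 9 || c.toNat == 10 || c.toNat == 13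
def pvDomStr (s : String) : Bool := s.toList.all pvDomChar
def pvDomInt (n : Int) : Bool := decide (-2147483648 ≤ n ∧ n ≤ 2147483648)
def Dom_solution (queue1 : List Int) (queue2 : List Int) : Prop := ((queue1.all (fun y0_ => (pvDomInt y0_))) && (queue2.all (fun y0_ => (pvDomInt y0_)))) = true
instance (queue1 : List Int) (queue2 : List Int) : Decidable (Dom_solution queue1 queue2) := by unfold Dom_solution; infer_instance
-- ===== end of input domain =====

-- B replaces A's two mutated deques by an index window [l, r) with a running sum
-- over the fixed circular array queue1 ++ queue2 (objective: alternative; same move count).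

-- ===== PORT A =====
-- A's while-loop; deques become lists (popleft = tail, append = ++ [·]); the
-- trailing 'if not queue1 or not queue2: answer = -1' is the final if-branch.
-- fuel is a totality device only: the cap branch fires at answer = 600001, so
-- 600002 units are never exhausted from the initial call.
def loopA (fuel : Nat) (answer q1 q2 : Int) (queue1 queue2 : List Int) : Int :=
  match fuel with
  | 0 => -1
  | fuel + 1 =>
    if queue1 ≠ [] ∧ queue2 ≠ [] then
      if answer > 600000 then -1
      else if q1 = q2 then answer
      else if q1 < q2 then
        loopA fuel (answer + 1) (q1 + queue2.headD 0) (q2 - queue2.headD 0)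
          (queue1 ++ [queue2.headD 0]) queue2.tail
      else
        loopA fuel (answer + 1) (q1 - queue1.headD 0) (q2 + queue1.headD 0)
          queue1.tail (queue2 ++ [queue1.headD 0])
    else
      if queue1 = [] ∨ queue2 = [] then -1 else answer

def solution (queue1 : List Int) (queue2 : List Int) : Int :=
  loopA 600002 0 queue1.sum queue2.sum queue1 queue2

-- ===== PORT B =====
-- B's while-loop over indices; combined[i % L] is always in range here, ported as
-- pyGetD (exact on in-range indices); fuel is the same totality device as in loopA.
def loopB (c : List Int) (L S : Int) (fuel : Nat) (answer s1 l r : Int) : Int :=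
  match fuel with
  | 0 => -1
  | fuel + 1 =>
    if (r - l ≠ 0 ∧ r - l ≠ L) then
      if answer > 600000 then -1
      else if 2 * s1 = S then answer
      else if 2 * s1 < S then
        loopB c L S fuel (answer + 1) (s1 + PySem.List.pyGetD c (PySem.Int.mod r L) 0) l (r + 1)
      else
        loopB c L S fuel (answer + 1) (s1 - PySem.List.pyGetD c (PySem.Int.mod l L) 0) (l + 1) r
    else -1

def solution_alt (queue1 : List Int) (queue2 : List Int) : Int :=
  let c := queue1 ++ queue2
  loopB c (c.length : Int) c.sum 600002 0 queue1.sum 0 (queue1.length : Int)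

-- ===== PRECONDITION & SPEC =====
def Spec_solution (queue1 : List Int) (queue2 : List Int) (out : Int) : Prop := out = solution_alt queue1 queue2
instance (queue1 : List Int) (queue2 : List Int) (out : Int) : Decidable (Spec_solution queue1 queue2 out) := by unfold Spec_solution; infer_instance

-- ===== CLAIM (what is proved, stated in full; the proofs are below) =====
def Claim_equal_solution : Prop := ∀ (queue1 : List Int) (queue2 : List Int), Dom_solution queue1 queue2 → Spec_solution queue1 queue2 (solution queue1 queue2)

-- ===== LEMMAS AND PROOFS =====

-- circular window of length k starting at i over c
def pvCyc (c : List Int) (i k : Nat) : List Int :=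
  (List.range k).map (fun j => c.getD ((i + j) % c.length) 0)

lemma pvCyc_length (c : List Int) (i k : Nat) : (pvCyc c i k).length = k := by
  simp [pvCyc]

lemma pvCyc_zero (c : List Int) (i : Nat) : pvCyc c i 0 = [] := by simp [pvCyc]

lemma pvCyc_cons (c : List Int) (i k : Nat) :
    pvCyc c i (k + 1) = c.getD (i % c.length) 0 :: pvCyc c (i + 1) k := by
  unfold pvCyc
  rw [List.range_succ_eq_map]
  simp [List.map_map, Function.comp]
  intro a _
  have : i + (a + 1) = i + 1 + a := by omega
  rw [this]

lemma pvCyc_snoc (c : List Int) (i k : Nat) :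
    pvCyc c i (k + 1) = pvCyc c i k ++ [c.getD ((i + k) % c.length) 0] := by
  unfold pvCyc
  rw [List.range_succ]
  simp

lemma pvCyc_prefix (a b : List Int) : pvCyc (a ++ b) 0 a.length = a := by
  apply List.ext_getElem
  · simp [pvCyc_length]
  · intro j h1 h2
    simp only [pvCyc, List.getElem_map, List.getElem_range, Nat.zero_add]
    rw [pvCyc_length] at h1
    rw [Nat.mod_eq_of_lt (by simp; omega)]
    rw [List.getD_eq_getElem?_getD, List.getElem?_append_left h2, List.getElem?_eq_getElem h2]
    rfl

lemma pvCyc_suffix (a b : List Int) :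
    pvCyc (a ++ b) a.length ((a ++ b).length - a.length) = b := by
  apply List.ext_getElem
  · simp [pvCyc_length]
  · intro j h1 h2
    simp only [pvCyc, List.getElem_map, List.getElem_range]
    rw [Nat.mod_eq_of_lt (by simp; omega)]
    rw [List.getD_eq_getElem?_getD, List.getElem?_append_right (by omega)]
    rw [List.getElem?_eq_getElem (by omega)]
    simp

lemma pvKey (c : List Int) (S : Int) : ∀ (fuel : Nat) (answer : Int) (l k : Nat),
    k ≤ c.length → ∀ (s1 : Int),
    loopA fuel answer s1 (S - s1) (pvCyc c l k) (pvCyc c (l + k) (c.length - k)) =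
    loopB c (c.length : Int) S fuel answer s1 (l : Int) ((l : Int) + (k : Int)) := by
  intro fuel
  induction fuel with
  | zero => intro answer l k hk s1; rfl
  | succ n ih =>
    intro answer l k hk s1
    show (if pvCyc c l k ≠ [] ∧ pvCyc c (l + k) (c.length - k) ≠ [] then
        if answer > 600000 then -1
        else if s1 = S - s1 then answer
        else if s1 < S - s1 then
          loopA n (answer + 1) (s1 + (pvCyc c (l + k) (c.length - k)).headD 0)
            (S - s1 - (pvCyc c (l + k) (c.length - k)).headD 0)
            (pvCyc c l k ++ [(pvCyc c (l + k) (c.length - k)).headD 0])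
            (pvCyc c (l + k) (c.length - k)).tail
        else
          loopA n (answer + 1) (s1 - (pvCyc c l k).headD 0) (S - s1 + (pvCyc c l k).headD 0)
            (pvCyc c l k).tail
            (pvCyc c (l + k) (c.length - k) ++ [(pvCyc c l k).headD 0])
      else
        if pvCyc c l k = [] ∨ pvCyc c (l + k) (c.length - k) = [] then -1 else answer)
      = (if ((l : Int) + (k : Int) - (l : Int) ≠ 0 ∧ (l : Int) + (k : Int) - (l : Int) ≠ (c.length : Int)) then
        if answer > 600000 then -1
        else if 2 * s1 = S then answer
        else if 2 * s1 < S then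
          loopB c (c.length : Int) S n (answer + 1)
            (s1 + PySem.List.pyGetD c (PySem.Int.mod ((l : Int) + (k : Int)) (c.length : Int)) 0)
            (l : Int) ((l : Int) + (k : Int) + 1)
        else
          loopB c (c.length : Int) S n (answer + 1)
            (s1 - PySem.List.pyGetD c (PySem.Int.mod (l : Int) (c.length : Int)) 0)
            ((l : Int) + 1) ((l : Int) + (k : Int))
      else -1)
    by_cases hw : k = 0 ∨ k = c.length
    · have hA : ¬ (pvCyc c l k ≠ [] ∧ pvCyc c (l + k) (c.length - k) ≠ []) := by
        rcases hw with h | h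
        · subst h; simp [pvCyc_zero]
        · intro h2
          exact h2.2 (by simp [show c.length - k = 0 by omega, pvCyc_zero])
      have hpos : pvCyc c l k = [] ∨ pvCyc c (l + k) (c.length - k) = [] := by
        rcases hw with h | h
        · left; subst h; exact pvCyc_zero c l
        · right; simp [show c.length - k = 0 by omega, pvCyc_zero]
      have hB : ¬ ((l : Int) + (k : Int) - (l : Int) ≠ 0 ∧
          (l : Int) + (k : Int) - (l : Int) ≠ (c.length : Int)) := by omega
      rw [if_neg hA, if_pos hpos, if_neg hB]
    · push Not at hw
      have hA : pvCyc c l k ≠ [] ∧ pvCyc c (l + k) (c.length - k) ≠ [] := by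
        constructor
        · intro h
          have := pvCyc_length c l k
          rw [h] at this
          exact hw.1 (by simpa using this.symm)
        · intro h
          have := pvCyc_length c (l + k) (c.length - k)
          rw [h] at this
          simp at this
          omega
      have hB : ((l : Int) + (k : Int) - (l : Int) ≠ 0 ∧
          (l : Int) + (k : Int) - (l : Int) ≠ (c.length : Int)) := by omega
      rw [if_pos hA, if_pos hB]
      by_cases hcap : answer > 600000
      · rw [if_pos hcap, if_pos hcap]
      · rw [if_neg hcap, if_neg hcap]
        by_cases heq : 2 * s1 = S
        · rw [if_pos (show s1 = S - s1 by omega), if_pos heq]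
        · rw [if_neg (show ¬ s1 = S - s1 by omega), if_neg heq]
          have hg2 : PySem.List.pyGetD c (PySem.Int.mod ((l : Int) + (k : Int)) ((c.length : Int))) 0
              = c.getD ((l + k) % c.length) 0 := by
            rw [show ((l : Int) + (k : Int)) = (((l + k : Nat) : Int)) by push_cast; ring,
               PySem.Int.mod_natCast, PySem.List.pyGetD_natCast]
          have hg1 : PySem.List.pyGetD c (PySem.Int.mod ((l : Int)) ((c.length : Int))) 0
              = c.getD (l % c.length) 0 := by
            rw [PySem.Int.mod_natCast, PySem.List.pyGetD_natCast]
          by_cases hlt : 2 * s1 < S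
          · rw [if_pos (show s1 < S - s1 by omega), if_pos hlt]
            obtain ⟨m, hm⟩ : ∃ m, c.length - k = m + 1 := ⟨c.length - k - 1, by omega⟩
            rw [hm, pvCyc_cons]
            simp only [List.headD_cons, List.tail_cons]
            rw [sub_sub, show m = c.length - (k + 1) by omega, ← pvCyc_snoc,
               show l + k + 1 = l + (k + 1) by omega]
            rw [ih (answer + 1) l (k + 1) (by omega)
              (s1 + c.getD ((l + k) % c.length) 0), hg2]
            rw [show ((l : Int) + ((k + 1 : Nat) : Int)) = ((l : Int) + (k : Int) + 1) by
              push_cast; ring]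
          · rw [if_neg (show ¬ s1 < S - s1 by omega), if_neg hlt]
            obtain ⟨k', hk'⟩ : ∃ k', k = k' + 1 := ⟨k - 1, by omega⟩
            subst hk'
            rw [pvCyc_cons]
            simp only [List.headD_cons, List.tail_cons]
            have hsnoc : pvCyc c (l + (k' + 1)) (c.length - (k' + 1)) ++ [c.getD (l % c.length) 0]
                = pvCyc c ((l + 1) + k') (c.length - k') := by
              rw [show c.length - k' = (c.length - (k' + 1)) + 1 by omega, pvCyc_snoc,
                 show (l + 1) + k' = l + (k' + 1) by omega,
                 show l + (k' + 1) + (c.length - (k' + 1)) = l + c.length by omega,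
                 Nat.add_mod_right]
            rw [hsnoc, show S - s1 + c.getD (l % c.length) 0
                  = S - (s1 - c.getD (l % c.length) 0) by ring]
            rw [ih (answer + 1) (l + 1) k' (by omega)
              (s1 - c.getD (l % c.length) 0), hg1]
            rw [show (((l + 1 : Nat) : Int)) = ((l : Int) + 1) by push_cast; ring,
               show ((l : Int) + 1 + (k' : Int)) = ((l : Int) + ((k' + 1 : Nat) : Int)) by
                 push_cast; ring]

-- ===== VERDICT (by name: the statement is the Claim_ definition above) =====
theorem solution_spec : Claim_equal_solution := by
  intro q1 q2 _
  show solution q1 q2 = solution_alt q1 q2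
  unfold solution solution_alt
  have key := pvKey (q1 ++ q2) ((q1 ++ q2).sum) 600002 0 0 q1.length (by simp) q1.sum
  rw [pvCyc_prefix, Nat.zero_add, pvCyc_suffix] at key
  rw [show (q1 ++ q2).sum - q1.sum = q2.sum by simp [List.sum_append]] at key
  rw [key]
  norm_num
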